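-- pv_equiv track=rewrite | github.com/machinexa2/SSRFuck | lib/ParamReplacer.py | replacement
-- ===== SOURCE A (Python) =====
-- def replacement(parameter: list, value: list, replace_str: str) -> list:
--     small_counter  = []
--     parameter_list = []
--     parameter_length = len(parameter)
--     counter = 0
--     while counter != parameter_length:
--         temp = value[counter]
--         for i in range(parameter_length):
--             value[counter] = replace_str
--             small_counter.append(parameter[i] + '=' + value[i])
--         parameter_list.append(small_counter)
--         value[counter] = temp
--         counter += 1
--         small_counter = []
--     return parameter_list
-- ===== SOURCE B (Python) =====
-- def replacement(parameter: list, value: list, replace_str: str) -> list: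
--     n = len(parameter)
--     base = [parameter[i] + '=' + value[i] for i in range(n)]
--     result = []
--     for counter in range(n):
--         row = base.copy()
--         row[counter] = parameter[counter] + '=' + replace_str
--         result.append(row)
--     return result
-- ===== Notes on version B (the rewrite author's own statement) =====
-- stated objective: simpler
-- what changed: B builds the param=value base row once and, for each index, copies it and patches the single replaced cell, instead of A's nested loops that temporarily mutate the value list and rebuild every row pairwise from scratch.
import Mathlib
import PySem

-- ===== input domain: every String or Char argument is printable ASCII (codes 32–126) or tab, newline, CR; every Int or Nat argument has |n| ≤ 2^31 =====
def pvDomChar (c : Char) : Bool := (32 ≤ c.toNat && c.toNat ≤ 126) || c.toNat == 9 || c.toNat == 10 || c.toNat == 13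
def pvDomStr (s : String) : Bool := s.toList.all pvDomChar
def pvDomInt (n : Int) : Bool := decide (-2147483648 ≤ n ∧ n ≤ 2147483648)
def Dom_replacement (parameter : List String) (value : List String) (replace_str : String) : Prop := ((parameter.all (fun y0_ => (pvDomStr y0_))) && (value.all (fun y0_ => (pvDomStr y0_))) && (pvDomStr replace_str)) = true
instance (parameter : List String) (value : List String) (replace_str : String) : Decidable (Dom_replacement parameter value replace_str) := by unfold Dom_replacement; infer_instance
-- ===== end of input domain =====

-- B replaces A's nested mutate-and-rebuild loops by building the base row once and patching one
-- cell per copy (objective: simpler). A mutates `value` only transiently and restores it, so the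
-- net effect on the argument is none; the equivalence is about the return value.

-- ===== PORT A =====
-- A's while-loop runs counter = 0,1,…,len(parameter)-1, so it is ported as a fold over that
-- range with state (value, parameter_list); the inner for-loop is a fold with state
-- (value, small_counter). Indexing uses getD "" — on Pre_ every index is in range, so this is
-- exact there (out of range Python raises and the input is outside Pre_).
def replacement (parameter : List String) (value : List String) (replace_str : String) : List (List String) :=
  let n := parameter.length
  (((List.range n).foldl (fun (st : List String × List (List String)) counter =>
      let value := st.1
      let temp := value.getD counter ""
      let inner := (List.range n).foldl (fun (st2 : List String × List String) i =>
          let v := st2.1.set counter replace_str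
          (v, st2.2 ++ [parameter.getD i "" ++ "=" ++ v.getD i ""])) (value, [])
      (inner.1.set counter temp, st.2 ++ [inner.2])) (value, []))).2

-- ===== PORT B =====
def replacement_alt (parameter : List String) (value : List String) (replace_str : String) : List (List String) :=
  let n := parameter.length
  let base := (List.range n).map (fun i => parameter.getD i "" ++ "=" ++ value.getD i "")
  (List.range n).map (fun counter => base.set counter (parameter.getD counter "" ++ "=" ++ replace_str))

-- ===== PRECONDITION & SPEC =====
-- Pre_ excludes exactly the inputs where len(value) < len(parameter): there Python A raises
-- IndexError (reading value[counter]) and Python B raises IndexError too.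
def Pre_replacement (parameter : List String) (value : List String) (replace_str : String) : Prop :=
  parameter.length ≤ value.length
instance (parameter : List String) (value : List String) (replace_str : String) : Decidable (Pre_replacement parameter value replace_str) := by unfold Pre_replacement; infer_instance
def pvWitness_replacement : List String × List String × String := (["a", "b"], ["1", "2"], "X")

def Spec_replacement (parameter : List String) (value : List String) (replace_str : String) (out : List (List String)) : Prop := out = replacement_alt parameter value replace_str
instance (parameter : List String) (value : List String) (replace_str : String) (out : List (List String)) : Decidable (Spec_replacement parameter value replace_str out) := by unfold Spec_replacement; infer_instance

-- ===== CLAIM (what is proved, stated in full; the proofs are below) =====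
def Claim_equal_replacement : Prop := ∀ (parameter : List String) (value : List String) (replace_str : String), Dom_replacement parameter value replace_str → Pre_replacement parameter value replace_str → Spec_replacement parameter value replace_str (replacement parameter value replace_str)

-- ===== LEMMAS AND PROOFS =====

-- A's inner loop over a nonempty index list: value ends as value.set counter replace_str and the
-- appended cells read that updated list.
theorem innerA_eq (parameter : List String) (replace_str : String) (counter : Nat)
    (l : List Nat) (v : List String) (acc : List String) :
    l.foldl (fun (st2 : List String × List String) i =>
        let v' := st2.1.set counter replace_str
        (v', st2.2 ++ [parameter.getD i "" ++ "=" ++ v'.getD i ""])) (v, acc)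
      = ((if l.isEmpty then v else v.set counter replace_str),
         acc ++ l.map (fun i => parameter.getD i "" ++ "=" ++ (v.set counter replace_str).getD i "")) := by
  induction l generalizing v acc with
  | nil => simp
  | cons a t ih =>
    simp only [List.foldl_cons, List.map_cons]
    rw [ih]
    simp [List.set_set]

theorem set_getD_self (v : List String) (c : Nat) (h : c < v.length) :
    v.set c (v.getD c "") = v := by
  apply List.ext_getElem
  · simp
  · intro i h1 h2
    by_cases hic : i = c
    · subst hic; simp [List.getD, List.getElem?_eq_getElem h]
    · rw [List.getElem_set_ne (by omega)]

-- the row A builds for index c equals B's patched base row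
theorem row_eq (parameter value : List String) (replace_str : String) (c : Nat)
    (hc : c < parameter.length) (hv : parameter.length ≤ value.length) :
    (List.range parameter.length).map
        (fun i => parameter.getD i "" ++ "=" ++ (value.set c replace_str).getD i "")
      = ((List.range parameter.length).map
          (fun i => parameter.getD i "" ++ "=" ++ value.getD i "")).set c
          (parameter.getD c "" ++ "=" ++ replace_str) := by
  apply List.ext_getElem
  · simp
  · intro i h1 h2
    simp only [List.length_map, List.length_range] at h1
    by_cases hic : i = c
    · subst hic
      rw [List.getElem_set_self (by simp; omega)]
      simp only [List.getElem_map, List.getElem_range]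
      have hgd : (value.set i replace_str).getD i "" = replace_str := by
        have hlt : i < (value.set i replace_str).length := by simp; omega
        rw [List.getD_eq_getElem _ _ hlt, List.getElem_set_self (by omega)]
      rw [hgd]
    · rw [List.getElem_set_ne (by omega)]
      simp only [List.getElem_map, List.getElem_range]
      have hgd : (value.set c replace_str).getD i "" = value.getD i "" := by
        simp [List.getD_eq_getElem?_getD, List.getElem?_set_ne (show c ≠ i by omega)]
      rw [hgd]

-- A's outer loop over a list of valid counters: value is restored each round and the accumulated
-- rows are exactly B's rows.
theorem outerA_eq (parameter value : List String) (replace_str : String)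
    (hv : parameter.length ≤ value.length)
    (l : List Nat) (hl : ∀ c ∈ l, c < parameter.length) (acc : List (List String)) :
    l.foldl (fun (st : List String × List (List String)) counter =>
        let v := st.1
        let temp := v.getD counter ""
        let inner := (List.range parameter.length).foldl (fun (st2 : List String × List String) i =>
            let v' := st2.1.set counter replace_str
            (v', st2.2 ++ [parameter.getD i "" ++ "=" ++ v'.getD i ""])) (v, [])
        (inner.1.set counter temp, st.2 ++ [inner.2])) (value, acc)
      = (value, acc ++ l.map (fun c =>
          ((List.range parameter.length).map
            (fun i => parameter.getD i "" ++ "=" ++ value.getD i "")).set c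
            (parameter.getD c "" ++ "=" ++ replace_str))) := by
  induction l generalizing acc with
  | nil => simp
  | cons c t ih =>
    have hc : c < parameter.length := hl c (List.mem_cons_self ..)
    have ht : ∀ x ∈ t, x < parameter.length := fun x hx => hl x (List.mem_cons_of_mem _ hx)
    simp only [List.foldl_cons, List.map_cons]
    rw [innerA_eq]
    have hnz : parameter.length ≠ 0 := by omega
    rw [if_neg (by simp [List.isEmpty_iff, List.range_eq_nil, hnz])]
    rw [List.set_set, set_getD_self value c (by omega),
        row_eq parameter value replace_str c hc hv, ih ht]
    simp

-- ===== VERDICT (by name: the statement is the Claim_ definition above) =====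
theorem replacement_spec : Claim_equal_replacement := by
  intro parameter value replace_str _ hpre
  unfold Spec_replacement
  simp only [replacement, replacement_alt]
  rw [outerA_eq parameter value replace_str hpre (List.range parameter.length)
      (fun c hc => by simpa using hc) []]
  simp
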